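-- pv_equiv track=rewrite | github.com/Aniketsonii/Learning | Python/count_dice_ways.py | count_dice_ways
-- ===== SOURCE A (Python) =====
-- def count_dice_ways(target_sum):
--     if target_sum < 2 or target_sum > 12:
--         return 0
--
--     count = 0
--     for dice1 in range(1, 7):
--         for dice2 in range(1, 7):
--             if dice1 + dice2 == target_sum:
--                 count += 1
--
--     return count
-- ===== SOURCE B (Python) =====
-- def count_dice_ways(target_sum):
--     if target_sum < 2 or target_sum > 12:
--         return 0
--     return 6 - abs(target_sum - 7)
-- ===== Notes on version B (the rewrite author's own statement) =====
-- stated objective: simpler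
-- what changed: Replaces the nested enumeration of all dice pairs with the closed-form tent formula (six minus the distance of target_sum from the peak sum) inside the same [2,12] guard.
import Mathlib
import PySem

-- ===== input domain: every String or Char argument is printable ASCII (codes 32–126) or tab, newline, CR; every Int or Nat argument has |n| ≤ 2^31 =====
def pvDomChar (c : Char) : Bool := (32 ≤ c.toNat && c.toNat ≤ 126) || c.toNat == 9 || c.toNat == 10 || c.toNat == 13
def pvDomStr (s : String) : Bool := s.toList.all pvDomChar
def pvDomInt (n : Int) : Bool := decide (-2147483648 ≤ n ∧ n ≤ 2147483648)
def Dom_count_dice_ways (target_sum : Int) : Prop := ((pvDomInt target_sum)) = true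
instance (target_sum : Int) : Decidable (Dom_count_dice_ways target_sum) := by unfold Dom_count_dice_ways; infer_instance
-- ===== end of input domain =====

-- B replaces A's nested dice-pair loop with the closed-form tent formula under the same [2,12] guard (simpler).


-- ===== PORT A =====
def count_dice_ways (target_sum : Int) : Int :=
  if target_sum < 2 ∨ target_sum > 12 then 0
  else
    (PySem.List.pyRange 1 7 1).foldl (fun count dice1 =>
      (PySem.List.pyRange 1 7 1).foldl (fun count dice2 =>
        if dice1 + dice2 = target_sum then count + 1 else count) count) 0

-- ===== PORT B =====
def count_dice_ways_alt (target_sum : Int) : Int :=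
  if target_sum < 2 ∨ target_sum > 12 then 0
  else 6 - |target_sum - 7|

-- ===== PRECONDITION & SPEC =====
def Spec_count_dice_ways (target_sum : Int) (out : Int) : Prop := out = count_dice_ways_alt target_sum
instance (target_sum : Int) (out : Int) : Decidable (Spec_count_dice_ways target_sum out) := by unfold Spec_count_dice_ways; infer_instance

-- ===== CLAIM (what is proved, stated in full; the proofs are below) =====
def Claim_equal_count_dice_ways : Prop := ∀ (target_sum : Int), Dom_count_dice_ways target_sum → Spec_count_dice_ways target_sum (count_dice_ways target_sum)

-- ===== LEMMAS AND PROOFS =====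

-- ===== VERDICT (by name: the statement is the Claim_ definition above) =====
theorem count_dice_ways_spec : Claim_equal_count_dice_ways := by
  intro t _
  unfold Spec_count_dice_ways count_dice_ways count_dice_ways_alt
  by_cases h : t < 2 ∨ t > 12
  · rw [if_pos h, if_pos h]
  · rw [if_neg h, if_neg h]
    have h2 : 2 ≤ t := by omega
    have h12 : t ≤ 12 := by omega
    interval_cases t <;> decide
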